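-- pv_equiv track=rewrite | github.com/hyoeun98/boj | 프로그래머스/lv1/17681. ［1차］ 비밀지도/［1차］ 비밀지도.py | solution
-- ===== SOURCE A (Python) =====
-- def solution(n, arr1, arr2):
--     bin_arr1 = [str(bin(i))[2:].zfill(n) for i in arr1]
--     bin_arr2 = [str(bin(i))[2:].zfill(n) for i in arr2]
--
--     answer = [[0] * n for _ in range(n)]
--
--     for i in range(n):
--         for j in range(n):
--             answer[i][j] = "#" if int(bin_arr1[i][j]) or int(bin_arr2[i][j]) else " "
--     return list(map("".join, answer))
-- ===== SOURCE B (Python) =====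
-- def solution(n, arr1, arr2):
--     rows = []
--     for i in range(n):
--         bits = bin(arr1[i] | arr2[i])[2:].zfill(n)
--         rows.append(''.join('#' if c == '1' else ' ' for c in bits))
--     return rows
-- ===== Notes on version B (the rewrite author's own statement) =====
-- stated objective: idiomatic
-- what changed: A builds zero-filled binary strings for both whole arrays, fills an n-by-n integer grid via a nested i,j loop comparing one character of each string per cell, and joins each grid row; B makes a single pass over the rows, ORs the two integers bitwise, and renders each row directly from that one binary string - the inner column loop and the 2D buffer disappear. …
-- outside the precondition, e.g. on solution(1, [2], [0]): A returns ['#'], B returns ['# ']; on solution(1, [1], [-1]): A returns ['#'], B returns [' #']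
import Mathlib
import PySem

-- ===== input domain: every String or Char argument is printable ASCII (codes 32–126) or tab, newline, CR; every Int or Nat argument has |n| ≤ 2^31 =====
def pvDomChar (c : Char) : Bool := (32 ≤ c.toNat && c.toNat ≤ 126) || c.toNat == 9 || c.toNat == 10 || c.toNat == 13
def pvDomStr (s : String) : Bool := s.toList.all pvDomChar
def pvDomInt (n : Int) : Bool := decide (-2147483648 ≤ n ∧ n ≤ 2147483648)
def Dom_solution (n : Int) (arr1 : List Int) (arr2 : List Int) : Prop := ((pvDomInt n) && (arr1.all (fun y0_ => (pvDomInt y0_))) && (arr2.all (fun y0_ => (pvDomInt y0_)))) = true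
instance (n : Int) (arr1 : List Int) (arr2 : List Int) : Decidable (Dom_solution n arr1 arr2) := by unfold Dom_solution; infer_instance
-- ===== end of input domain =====

-- B replaces A's n×n integer grid and nested per-cell character loop by one pass over the rows:
-- a single integer bitwise OR per row, rendered once as a zero-filled binary string (objective: idiomatic one-pass rewrite, same return values on Pre_).

-- ===== PORT A =====
def solution (n : Int) (arr1 : List Int) (arr2 : List Int) : List String :=
  let bin1 := arr1.map (fun v => PySem.Chars.zfill (PySem.List.slice (PySem.Int.toBinChars0b v) (some 2)) n)
  let bin2 := arr2.map (fun v => PySem.Chars.zfill (PySem.List.slice (PySem.Int.toBinChars0b v) (some 2)) n)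
  (PySem.List.pyRange 0 n).map (fun i =>
    PySem.Str.join "" ((PySem.List.pyRange 0 n).map (fun j =>
      if (PySem.Int.ofChars? [PySem.List.pyGetD (PySem.List.pyGetD bin1 i []) j ' ']).getD 0 ≠ 0
        ∨ (PySem.Int.ofChars? [PySem.List.pyGetD (PySem.List.pyGetD bin2 i []) j ' ']).getD 0 ≠ 0
      then "#" else " ")))

-- ===== PORT B =====
def solution_alt (n : Int) (arr1 : List Int) (arr2 : List Int) : List String :=
  (PySem.List.pyRange 0 n).map (fun i =>
    let bits := PySem.Chars.zfill (PySem.List.slice (PySem.Int.toBinChars0b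
        (PySem.Int.bor (PySem.List.pyGetD arr1 i 0) (PySem.List.pyGetD arr2 i 0))) (some 2)) n
    String.ofList (bits.map (fun c => if c = '1' then '#' else ' ')))

-- ===== PRECONDITION & SPEC =====
-- Pre_ restricts to the task's natural domain: each array holds at least n entries and the first n
-- entries lie in [0, 2^n).  Outside it A raises IndexError (short arrays) or ValueError (negative
-- entries, except an accidental short-circuit corner where the 'or' never reads the negative value),
-- and on entries ≥ 2^n A's row is the leading n characters of an over-long binary string — a corner
-- no statement of the task specifies, where B keeps the whole string.
def Pre_solution (n : Int) (arr1 : List Int) (arr2 : List Int) : Prop :=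
  n ≤ (arr1.length : Int) ∧ n ≤ (arr2.length : Int) ∧
  (∀ i < n.toNat, 0 ≤ arr1.getD i 0 ∧ arr1.getD i 0 < (2 : Int) ^ n.toNat) ∧
  (∀ i < n.toNat, 0 ≤ arr2.getD i 0 ∧ arr2.getD i 0 < (2 : Int) ^ n.toNat)
instance (n : Int) (arr1 : List Int) (arr2 : List Int) : Decidable (Pre_solution n arr1 arr2) := by
  unfold Pre_solution; infer_instance
def pvWitness_solution : Int × List Int × List Int := (2, [1, 2], [3, 1])
def Spec_solution (n : Int) (arr1 : List Int) (arr2 : List Int) (out : List String) : Prop := out = solution_alt n arr1 arr2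
instance (n : Int) (arr1 : List Int) (arr2 : List Int) (out : List String) : Decidable (Spec_solution n arr1 arr2 out) := by unfold Spec_solution; infer_instance

-- ===== CLAIM (what is proved, stated in full; the proofs are below) =====
def Claim_equal_solution : Prop := ∀ (n : Int) (arr1 : List Int) (arr2 : List Int), Dom_solution n arr1 arr2 → Pre_solution n arr1 arr2 → Spec_solution n arr1 arr2 (solution n arr1 arr2)

-- ===== LEMMAS AND PROOFS =====
def pvBits : Nat → List Char
  | m => if h : m = 0 then [] else pvBits (m / 2) ++ [if m % 2 = 1 then '1' else '0']
  decreasing_by exact Nat.div_lt_self (Nat.pos_of_ne_zero h) one_lt_two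

lemma pvSize_succ {m : Nat} (hm : 0 < m) : Nat.size m = Nat.size (m / 2) + 1 := by
  apply le_antisymm
  · rw [Nat.size_le]
    have h1 : m / 2 < 2 ^ Nat.size (m / 2) := Nat.lt_size_self _
    have : m < 2 * (m / 2) + 2 := by omega
    calc m < 2 * (m / 2) + 2 := this
      _ ≤ 2 * 2 ^ Nat.size (m / 2) := by omega
      _ = 2 ^ (Nat.size (m / 2) + 1) := by ring
  · show Nat.size (m / 2) < Nat.size m
    rw [Nat.lt_size]
    by_cases h2 : m / 2 = 0
    · simp [h2]; omega
    · have hp : 0 < Nat.size (m / 2) := Nat.size_pos.mpr (Nat.pos_of_ne_zero h2)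
      have : 2 ^ (Nat.size (m / 2) - 1) ≤ m / 2 := by
        have := (@Nat.lt_size (Nat.size (m / 2) - 1) (m / 2)).mp (by omega)
        exact this
      calc 2 ^ Nat.size (m / 2) = 2 * 2 ^ (Nat.size (m / 2) - 1) := by
            rw [← pow_succ']
            congr 1
            omega
        _ ≤ 2 * (m / 2) := by omega
        _ ≤ m := by omega

lemma pvBits_length (m : Nat) : (pvBits m).length = Nat.size m := by
  induction m using Nat.strong_induction_on with
  | _ m ih =>
    rw [pvBits]
    by_cases h : m = 0
    · simp [h]
    · simp only [h, dif_neg, not_false_iff, List.length_append, List.length_cons, List.length_nil]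
      rw [ih (m / 2) (Nat.div_lt_self (Nat.pos_of_ne_zero h) one_lt_two),
        pvSize_succ (Nat.pos_of_ne_zero h)]

lemma pvBits_getElem (m k : Nat) (h : k < (pvBits m).length) :
    (pvBits m)[k] = if m.testBit (Nat.size m - 1 - k) then '1' else '0' := by
  induction m using Nat.strong_induction_on generalizing k with
  | _ m ih =>
    by_cases h0 : m = 0
    · subst h0; simp [pvBits] at h
    · have hpos := Nat.pos_of_ne_zero h0
      have hlt := Nat.div_lt_self hpos one_lt_two
      have hlen : (pvBits (m / 2)).length = Nat.size (m / 2) := pvBits_length _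
      have hsz := pvSize_succ hpos
      have hm : pvBits m = pvBits (m / 2) ++ [if m % 2 = 1 then '1' else '0'] := by
        rw [pvBits]; simp [h0]
      have hL : (pvBits m).length = Nat.size (m/2) + 1 := by
        rw [hm]; simp [hlen]
      rcases lt_or_ge k (pvBits (m / 2)).length with hk | hk
      · have := ih (m / 2) hlt k hk
        rw [List.getElem_of_eq hm, List.getElem_append_left hk, this]
        have hidx : Nat.size (m / 2) - 1 - k + 1 = Nat.size m - 1 - k := by
          rw [hsz]; rw [hlen] at hk; omega
        rw [← hidx, Nat.testBit_add_one]
      · have hkk : k = (pvBits (m / 2)).length := by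
          have := h; rw [hm] at this; simp at this; omega
        rw [List.getElem_of_eq hm, List.getElem_append_right (le_of_eq hkk.symm)]
        have hidx : Nat.size m - 1 - k = 0 := by rw [hsz]; rw [hlen] at hkk; omega
        rw [hidx, Nat.testBit_zero]
        simp [hkk]

lemma pvToDigitsCore_eq : ∀ (f m : Nat) (acc : List Char), 0 < m → m < 2 ^ f →
    Nat.toDigitsCore 2 f m acc = pvBits m ++ acc := by
  intro f
  induction f with
  | zero => intro m acc h1 h2; omega
  | succ f ih =>
    intro m acc h1 h2
    rw [Nat.toDigitsCore]
    have hd : Nat.digitChar (m % 2) = if m % 2 = 1 then '1' else '0' := by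
      rcases Nat.mod_two_eq_zero_or_one m with h | h <;> simp [h, Nat.digitChar]
    by_cases hz : m / 2 = 0
    · have hm1 : m = 1 := by omega
      subst hm1
      simp [pvBits, Nat.digitChar]
    · rw [if_neg hz, ih (m / 2) _ (Nat.pos_of_ne_zero hz) (by omega)]
      conv_rhs => rw [pvBits]
      simp [h1.ne', hd]

lemma pvToDigits_eq (m : Nat) : Nat.toDigits 2 m = if m = 0 then ['0'] else pvBits m := by
  by_cases h : m = 0
  · subst h; decide
  · rw [if_neg h, Nat.toDigits,
      pvToDigitsCore_eq (m + 1) m [] (Nat.pos_of_ne_zero h)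
        (lt_of_lt_of_le Nat.lt_two_pow_self (Nat.pow_le_pow_right (by norm_num) (by omega))),
      List.append_nil]

lemma pvToDigits_length (m : Nat) : (Nat.toDigits 2 m).length = max 1 (Nat.size m) := by
  rw [pvToDigits_eq]
  by_cases h : m = 0
  · simp [h]
  · rw [if_neg h, pvBits_length]
    have : 0 < Nat.size m := Nat.size_pos.mpr (Nat.pos_of_ne_zero h)
    omega

lemma pvZfill_length (m w : Nat) :
    (PySem.Chars.zfill (Nat.toDigits 2 m) (w : Int)).length = max (max 1 (Nat.size m)) w := by
  rw [PySem.Chars.length_zfill, pvToDigits_length]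
  simp

lemma pvBits_mem (m : Nat) (c : Char) (h : c ∈ pvBits m) : c = '1' ∨ c = '0' := by
  induction m using Nat.strong_induction_on with
  | _ m ih =>
    by_cases h0 : m = 0
    · subst h0; rw [pvBits] at h; simp at h
    · rw [pvBits] at h
      simp only [h0, dif_neg, not_false_iff, List.mem_append, List.mem_singleton] at h
      rcases h with h | h
      · exact ih (m / 2) (Nat.div_lt_self (Nat.pos_of_ne_zero h0) one_lt_two) h
      · rcases Nat.mod_two_eq_zero_or_one m with h2 | h2 <;> simp [h2] at h <;> simp [h]

lemma pvCs_getElem (m j : Nat) (hj : j < (Nat.toDigits 2 m).length) :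
    (Nat.toDigits 2 m)[j] = if m.testBit ((Nat.toDigits 2 m).length - 1 - j) then '1' else '0' := by
  by_cases h : m = 0
  · subst h
    have h0 : Nat.toDigits 2 0 = ['0'] := by decide
    simp only [h0] at hj ⊢
    simp at hj
    simp [hj]
  · have h1 : Nat.toDigits 2 m = pvBits m := by rw [pvToDigits_eq, if_neg h]
    have h2 : (pvBits m).length = Nat.size m := pvBits_length m
    simp only [h1, h2] at hj ⊢
    exact pvBits_getElem m j (by rw [h2]; exact hj)

lemma pvZfill_getElem (m w j : Nat) (hw : 1 ≤ w)
    (hj : j < (PySem.Chars.zfill (Nat.toDigits 2 m) (w : Int)).length) :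
    (PySem.Chars.zfill (Nat.toDigits 2 m) (w : Int))[j] =
      if m.testBit ((PySem.Chars.zfill (Nat.toDigits 2 m) (w : Int)).length - 1 - j) then '1' else '0' := by
  have hcl : (Nat.toDigits 2 m).length = max 1 (Nat.size m) := pvToDigits_length m
  have hL : (PySem.Chars.zfill (Nat.toDigits 2 m) (w : Int)).length = max (max 1 (Nat.size m)) w :=
    pvZfill_length m w
  have hsm : m < 2 ^ Nat.size m := Nat.lt_size_self m
  by_cases hwb : (w : Int) ≤ ((Nat.toDigits 2 m).length : Int)
  · have hz : PySem.Chars.zfill (Nat.toDigits 2 m) (w : Int) = Nat.toDigits 2 m := by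
      simp only [PySem.Chars.zfill]
      rw [if_pos (by simpa using hwb)]
    simp only [hz] at hj ⊢
    exact pvCs_getElem m j hj
  · obtain ⟨c, rest, hc⟩ : ∃ c rest, Nat.toDigits 2 m = c :: rest := by
      cases h : Nat.toDigits 2 m with
      | nil => rw [h] at hcl; simp at hcl; omega
      | cons c rest => exact ⟨c, rest, rfl⟩
    have hcmem : c = '1' ∨ c = '0' := by
      have hcin : c ∈ Nat.toDigits 2 m := by rw [hc]; exact List.mem_cons_self
      rw [pvToDigits_eq] at hcin
      by_cases h : m = 0
      · simp [h] at hcin; right; exact hcin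
      · rw [if_neg h] at hcin; exact pvBits_mem m c hcin
    have hsign : ¬(c = '+' ∨ c = '-') := by rcases hcmem with h | h <;> subst h <;> decide
    have hclw : (Nat.toDigits 2 m).length < w := by
      simp at hwb; omega
    have hz : PySem.Chars.zfill (Nat.toDigits 2 m) (w : Int) =
        List.replicate (w - (Nat.toDigits 2 m).length) '0' ++ Nat.toDigits 2 m := by
      conv_lhs => rw [PySem.Chars.zfill.eq_def, hc]
      rw [if_neg (by rw [← hc]; simpa using hwb)]
      simp [hsign, ← hc]
    have hlen2 : (List.replicate (w - (Nat.toDigits 2 m).length) '0' ++ Nat.toDigits 2 m).length = w := by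
      simp; omega
    simp only [hz, hlen2] at hj ⊢
    rcases lt_or_ge j (w - (Nat.toDigits 2 m).length) with hcase | hcase
    · rw [List.getElem_append_left (by simpa using hcase)]
      rw [List.getElem_replicate]
      have hbit : m.testBit (w - 1 - j) = false := by
        apply Nat.testBit_lt_two_pow
        calc m < 2 ^ Nat.size m := hsm
          _ ≤ 2 ^ (w - 1 - j) := Nat.pow_le_pow_right (by norm_num) (by omega)
      rw [hbit]
      simp
    · rw [List.getElem_append_right (by simpa using hcase)]
      rw [pvCs_getElem m _ (by simp only [List.length_replicate]; omega)]
      have hidx : (Nat.toDigits 2 m).length - 1 -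
          (j - (List.replicate (w - (Nat.toDigits 2 m).length) '0').length) = w - 1 - j := by
        simp only [List.length_replicate]; omega
      rw [hidx]

lemma pvAchar (x w j : Nat) (hw : 1 ≤ w) (hxw : Nat.size x ≤ w) (hj : j < w) :
    (PySem.Chars.zfill (Nat.toDigits 2 x) (w : Int)).getD j ' ' =
      if x.testBit (w - 1 - j) then '1' else '0' := by
  have hL : (PySem.Chars.zfill (Nat.toDigits 2 x) (w : Int)).length = max (max 1 (Nat.size x)) w :=
    pvZfill_length x w
  have hLw : (PySem.Chars.zfill (Nat.toDigits 2 x) (w : Int)).length = w := by omega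
  have hjL : j < (PySem.Chars.zfill (Nat.toDigits 2 x) (w : Int)).length := by omega
  rw [List.getD_eq_getElem _ _ hjL, pvZfill_getElem x w j hw hjL, hLw]

lemma pvBrow (v w : Nat) (hw : 1 ≤ w) (hv : Nat.size v ≤ w) :
    PySem.Chars.zfill (Nat.toDigits 2 v) (w : Int) =
      (List.range w).map (fun j => if v.testBit (w - 1 - j) then '1' else '0') := by
  have hL : (PySem.Chars.zfill (Nat.toDigits 2 v) (w : Int)).length = w := by
    rw [pvZfill_length]; omega
  apply List.ext_getElem
  · simp [hL]
  · intro i h1 h2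
    rw [pvZfill_getElem v w i hw h1]
    simp [hL]

lemma pvJoin_singletons {α : Type} (l : List α) (g : α → Char) :
    PySem.Chars.join [] (l.map (fun a => [g a])) = l.map g := by
  have h := PySem.Chars.join_nil_singletons (l.map g)
  rw [List.map_map] at h
  simpa [Function.comp] using h

theorem pvMain_eq (n : Int) (arr1 : List Int) (arr2 : List Int)
    (hpre : Pre_solution n arr1 arr2) :
    solution n arr1 arr2 = solution_alt n arr1 arr2 := by
  obtain ⟨hl1, hl2, hp1, hp2⟩ := hpre
  simp only [solution, solution_alt]
  apply List.map_congr_left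
  intro i hi
  rw [PySem.List.mem_pyRange_one] at hi
  obtain ⟨hi0, hin⟩ := hi
  set w := n.toNat with hwdef
  have hw1 : 1 ≤ w := by omega
  obtain ⟨k, rfl, hkw⟩ : ∃ k : Nat, i = (k : Int) ∧ k < w := ⟨i.toNat, by omega, by omega⟩
  have hk1 : k < arr1.length := by omega
  have hk2 : k < arr2.length := by omega
  obtain ⟨hx0, hxlt⟩ := hp1 k hkw
  obtain ⟨hy0, hylt⟩ := hp2 k hkw
  set x := (arr1.getD k 0).toNat with hxdef
  set y := (arr2.getD k 0).toNat with hydef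
  have hxv : arr1.getD k 0 = (x : Int) := by omega
  have hyv : arr2.getD k 0 = (y : Int) := by omega
  have hnw : n = (w : Int) := by omega
  have hxw : x < 2 ^ w := by
    have : ((x : Int)) < (2 : Int) ^ w := by rw [← hxv]; exact hxlt
    exact_mod_cast this
  have hyw : y < 2 ^ w := by
    have : ((y : Int)) < (2 : Int) ^ w := by rw [← hyv]; exact hylt
    exact_mod_cast this
  have hbin0 : ∀ (z : Nat),
      PySem.Chars.zfill (PySem.List.slice (PySem.Int.toBinChars0b ((z : Int))) (some 2)) n =
      PySem.Chars.zfill (Nat.toDigits 2 z) (w : Int) := by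
    intro z
    rw [PySem.List.slice_from _ (by norm_num), PySem.Int.toBinChars0b]
    rw [if_neg (by omega)]
    simp [hnw, PySem.Int.toBinChars]
  have hbin : ∀ (arr : List Int) (z : Nat), k < arr.length → arr.getD k 0 = (z : Int) →
      PySem.List.pyGetD (arr.map (fun v =>
        PySem.Chars.zfill (PySem.List.slice (PySem.Int.toBinChars0b v) (some 2)) n)) (k : Int) [] =
      PySem.Chars.zfill (Nat.toDigits 2 z) (w : Int) := by
    intro arr z hk hz
    rw [PySem.List.pyGetD_natCast, List.getD_eq_getElem _ _ (by simpa using hk),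
      List.getElem_map]
    have : arr[k] = (z : Int) := by rw [← hz, List.getD_eq_getElem _ _ hk]
    rw [this]
    exact hbin0 z
  rw [hbin arr1 x hk1 hxv, hbin arr2 y hk2 hyv]
  -- B-side value: one bitwise OR per row
  simp only [PySem.List.pyGetD_natCast]
  rw [hxv, hyv]
  rw [show PySem.Int.bor ((x : Int)) ((y : Int)) = (((x ||| y : Nat)) : Int) by
    simp [PySem.Int.bor]]
  rw [hbin0 (x ||| y)]
  have hvlt : Nat.size (x ||| y) ≤ w := by
    rw [Nat.size_le]
    exact Nat.or_lt_two_pow hxw hyw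
  rw [pvBrow _ w hw1 hvlt, List.map_map]
  -- A-side: join of cells
  rw [PySem.Str.join]
  congr 1
  have hcells : ((PySem.List.pyRange 0 (w : Int)).map (fun j =>
      if (PySem.Int.ofChars? [PySem.List.pyGetD (PySem.Chars.zfill (Nat.toDigits 2 x) (w : Int)) j ' ']).getD 0 ≠ 0
        ∨ (PySem.Int.ofChars? [PySem.List.pyGetD (PySem.Chars.zfill (Nat.toDigits 2 y) (w : Int)) j ' ']).getD 0 ≠ 0
      then "#" else " ")).map String.toList =
      (PySem.List.pyRange 0 (w : Int)).map (fun j =>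
      [if (PySem.Int.ofChars? [PySem.List.pyGetD (PySem.Chars.zfill (Nat.toDigits 2 x) (w : Int)) j ' ']).getD 0 ≠ 0
        ∨ (PySem.Int.ofChars? [PySem.List.pyGetD (PySem.Chars.zfill (Nat.toDigits 2 y) (w : Int)) j ' ']).getD 0 ≠ 0
      then '#' else ' ']) := by
    rw [List.map_map]
    apply List.map_congr_left
    intro a _
    by_cases h : (PySem.Int.ofChars? [PySem.List.pyGetD (PySem.Chars.zfill (Nat.toDigits 2 x) (w : Int)) a ' ']).getD 0 ≠ 0
        ∨ (PySem.Int.ofChars? [PySem.List.pyGetD (PySem.Chars.zfill (Nat.toDigits 2 y) (w : Int)) a ' ']).getD 0 ≠ 0 <;>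
      simp [h]
  rw [show n = (w : Int) from hnw, show ("" : String).toList = [] from rfl, hcells, pvJoin_singletons]
  rw [PySem.List.pyRange_one]
  simp only [zero_add, List.map_map]
  apply List.map_congr_left
  intro j hj
  rw [List.mem_range] at hj
  simp only [Function.comp_apply]
  have hsx : Nat.size x ≤ w := Nat.size_le.mpr hxw
  have hsy : Nat.size y ≤ w := Nat.size_le.mpr hyw
  rw [PySem.List.pyGetD_natCast, PySem.List.pyGetD_natCast,
    pvAchar x w j hw1 hsx hj, pvAchar y w j hw1 hsy hj, Nat.testBit_or]
  cases x.testBit (w - 1 - j) <;> cases y.testBit (w - 1 - j) <;>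
    first
      | (simp; decide)
      | simp

-- ===== VERDICT (by name: the statement is the Claim_ definition above) =====
theorem solution_spec : Claim_equal_solution := by
  intro n arr1 arr2 _ hpre
  unfold Spec_solution
  exact pvMain_eq n arr1 arr2 hpre
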